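-- pv_equiv track=rewrite | github.com/Puhalenthi/Advent-of-Code-2023 | day7/advent_p2.py | isFourOfKind
-- ===== SOURCE A (Python) =====
-- from collections import Counter
--
-- def isFourOfKind(hand):
--     handDict = Counter(hand)
--     values = handDict.values()
--     if 'J' not in hand:
--         counts = {}
--         for card in hand:
--             counts[card] = counts.get(card, 0) + 1
--         return 4 in counts.values()
--     elif 4 in values:
--         return True
--     elif 3 in values and handDict['J'] == 1: # XXXJY
--         return True
--     elif handDict['J'] == 3 and len(handDict) == 3:
--         return True
--     elif handDict['J'] == 2 and len(handDict) == 3: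
--         return True
--
--     return False
-- ===== SOURCE B (Python) =====
-- def isFourOfKind(hand):
--     s = sorted(hand)
--     runs = []
--     i = 0
--     while i < len(s):
--         k = i
--         while k < len(s) and s[k] == s[i]:
--             k += 1
--         runs.append((s[i], k - i))
--         i = k
--     jokers = 0
--     for c, n in runs:
--         if c == 'J':
--             jokers = n
--     if jokers == 0:
--         return any(n == 4 for _, n in runs)
--     return (any(n == 4 for _, n in runs)
--             or (jokers == 1 and any(n == 3 for _, n in runs))
--             or (jokers in (2, 3) and len(runs) == 3))
-- ===== Notes on version B (the rewrite author's own statement) =====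
-- stated objective: alternative
-- what changed: B sorts the hand and scans it once into run-length groups (sort-then-scan), replacing A's two hash-counter passes and its five-branch elif ladder with one disjunction over run lengths.
import Mathlib
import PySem

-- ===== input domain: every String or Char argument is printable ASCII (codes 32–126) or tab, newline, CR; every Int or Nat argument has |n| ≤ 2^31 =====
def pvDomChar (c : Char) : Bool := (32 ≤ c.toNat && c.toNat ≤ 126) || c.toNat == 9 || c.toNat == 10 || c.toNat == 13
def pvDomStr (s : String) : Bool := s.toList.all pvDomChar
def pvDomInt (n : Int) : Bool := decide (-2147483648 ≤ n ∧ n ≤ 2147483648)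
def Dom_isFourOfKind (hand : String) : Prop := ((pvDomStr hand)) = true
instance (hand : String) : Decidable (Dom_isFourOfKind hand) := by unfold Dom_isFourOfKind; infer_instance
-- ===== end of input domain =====

-- B replaces A's Counter/dict passes by sort-then-scan run-length grouping and collapses the elif ladder into one disjunction (objective: alternative).

set_option maxHeartbeats 1000000


-- ===== PORT A =====
def isFourOfKind (hand : String) : Bool :=
  let handDict := PySem.Dict.counter hand.toList
  let values := handDict.values
  if !(PySem.Str.isIn "J" hand) then
    -- the explicit counting loop of A's no-joker branch
    let counts := hand.toList.foldl (fun d card => d.insert card (d.getD card 0 + 1)) PySem.Dict.empty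
    decide ((4:Int) ∈ counts.values)
  else if (4:Int) ∈ values then true
  else if (3:Int) ∈ values ∧ handDict.getD 'J' 0 = 1 then true
  else if handDict.getD 'J' 0 = 3 ∧ handDict.size = 3 then true
  else if handDict.getD 'J' 0 = 2 ∧ handDict.size = 3 then true
  else false

-- ===== PORT B =====
-- the two nested while loops of Source B: peel the maximal equal-prefix run, recurse on the rest
def altRuns : List Char → List (Char × Nat)
  | [] => []
  | c :: rest =>
      let t := (c :: rest).takeWhile (fun x => x == c)
      let rem := (c :: rest).dropWhile (fun x => x == c)
      (c, t.length) :: altRuns rem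
termination_by s => s.length
decreasing_by
  simp only [List.dropWhile_cons, beq_self_eq_true, if_true]
  exact Nat.lt_succ_of_le (List.length_dropWhile_le _ _)

def isFourOfKind_alt (hand : String) : Bool :=
  let s := PySem.List.sorted hand.toList (fun x => x) false
  let runs := altRuns s
  let jokers := runs.foldl (fun j p => if p.1 == 'J' then p.2 else j) 0
  if jokers == 0 then runs.any (fun p => p.2 == 4)
  else runs.any (fun p => p.2 == 4)
    || (jokers == 1 && runs.any (fun p => p.2 == 3))
    || ((jokers == 2 || jokers == 3) && runs.length == 3)

-- ===== PRECONDITION & SPEC =====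
def Spec_isFourOfKind (hand : String) (out : Bool) : Prop := out = isFourOfKind_alt hand
instance (hand : String) (out : Bool) : Decidable (Spec_isFourOfKind hand out) := by unfold Spec_isFourOfKind; infer_instance

-- ===== CLAIM (what is proved, stated in full; the proofs are below) =====
def Claim_equal_isFourOfKind : Prop := ∀ (hand : String), Dom_isFourOfKind hand → Spec_isFourOfKind hand (isFourOfKind hand)

-- ===== LEMMAS AND PROOFS =====

lemma pv_altRuns_cons (c : Char) (rest : List Char) :
    altRuns (c :: rest)
      = (c, ((c :: rest).takeWhile (fun x => x == c)).length)
        :: altRuns ((c :: rest).dropWhile (fun x => x == c)) := by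
  simp only [altRuns]

-- on a sorted list, nothing equal to the head survives dropWhile (== head)
lemma pv_dropWhile_not_mem (s : List Char) (c : Char)
    (hs : s.Pairwise (· ≤ ·)) (hle : ∀ x ∈ s, c ≤ x) :
    c ∉ s.dropWhile (fun x => x == c) := by
  induction s with
  | nil => simp
  | cons a as ih =>
    rcases List.pairwise_cons.mp hs with ⟨ha, has⟩
    rw [List.dropWhile_cons]
    by_cases hac : a = c
    · subst hac
      simp only [beq_self_eq_true, if_true]
      exact ih has (fun x hx => ha x hx)
    · simp only [beq_iff_eq, hac, if_false]
      intro hmem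
      rcases List.mem_cons.mp hmem with h | h
      · exact hac h.symm
      · have hca : c < a := lt_of_le_of_ne (hle a (by simp)) (Ne.symm hac)
        exact absurd (lt_of_lt_of_le hca (ha c h)) (lt_irrefl c)

-- combined characterisation of altRuns on a sorted list
lemma pv_altRuns_spec : ∀ s : List Char, s.Pairwise (· ≤ ·) →
    (∀ p ∈ altRuns s, p.1 ∈ s ∧ p.2 = s.count p.1) ∧
    (∀ c ∈ s, ∃ n, (c, n) ∈ altRuns s) ∧
    ((altRuns s).map Prod.fst).Nodup ∧
    (∀ j0 : Nat, (altRuns s).foldl (fun j p => if p.1 == 'J' then p.2 else j) j0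
        = if 'J' ∈ s then s.count 'J' else j0) := by
  intro s
  induction s using altRuns.induct with
  | case1 => intro _; simp [altRuns]
  | case2 c rest rem ih =>
    intro hs
    rcases List.pairwise_cons.mp hs with ⟨hc, _⟩
    have hle : ∀ x ∈ c :: rest, c ≤ x := by
      intro x hx
      rcases List.mem_cons.mp hx with h | h
      · exact le_of_eq h.symm
      · exact hc x h
    have hremsub : List.Sublist ((c :: rest).dropWhile (fun x => x == c)) (c :: rest) :=
      List.dropWhile_sublist _
    have hrem_pw : ((c :: rest).dropWhile (fun x => x == c)).Pairwise (· ≤ ·) :=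
      hs.sublist hremsub
    have hcrem : c ∉ (c :: rest).dropWhile (fun x => x == c) :=
      pv_dropWhile_not_mem (c :: rest) c hs hle
    have hsplit : (c :: rest).takeWhile (fun x => x == c)
        ++ (c :: rest).dropWhile (fun x => x == c) = c :: rest :=
      List.takeWhile_append_dropWhile
    have htc : ∀ x ∈ (c :: rest).takeWhile (fun x => x == c), x = c :=
      fun x hx => beq_iff_eq.mp (List.mem_takeWhile_imp (p := fun y => y == c) hx)
    have hcount_c : (c :: rest).count c = ((c :: rest).takeWhile (fun x => x == c)).length := by
      have h1 : ((c :: rest).takeWhile (fun x => x == c)).count c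
          = ((c :: rest).takeWhile (fun x => x == c)).length :=
        List.count_eq_length.mpr (fun b hb => (htc b hb).symm)
      have h2 : ((c :: rest).dropWhile (fun x => x == c)).count c = 0 :=
        List.count_eq_zero.mpr hcrem
      conv_lhs => rw [← hsplit]
      rw [List.count_append]
      omega
    have hcount_ne : ∀ x, x ≠ c →
        (c :: rest).count x = ((c :: rest).dropWhile (fun x => x == c)).count x := by
      intro x hx
      have h1 : ((c :: rest).takeWhile (fun x => x == c)).count x = 0 :=
        List.count_eq_zero.mpr (fun hmem => hx (htc x hmem))
      conv_lhs => rw [← hsplit]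
      rw [List.count_append]
      omega
    have hmem_iff : ∀ x, x ∈ c :: rest ↔ x = c ∨ x ∈ (c :: rest).dropWhile (fun x => x == c) := by
      intro x
      constructor
      · intro hx
        rw [← hsplit] at hx
        rcases List.mem_append.mp hx with h | h
        · exact Or.inl (htc x h)
        · exact Or.inr h
      · intro hx
        rcases hx with h | h
        · exact h ▸ (by simp)
        · exact hremsub.subset h
    obtain ⟨ih1, ih2, ih3, ih4⟩ := ih hrem_pw
    have hstep := pv_altRuns_cons c rest
    refine ⟨?_, ?_, ?_, ?_⟩
    · intro p hp
      rw [hstep] at hp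
      rcases List.mem_cons.mp hp with h | h
      · subst h; exact ⟨by simp, hcount_c.symm⟩
      · obtain ⟨hm, hcnt⟩ := ih1 p h
        have hpc : p.1 ≠ c := fun he => hcrem (by rw [he] at hm; exact hm)
        refine ⟨hremsub.subset hm, ?_⟩
        rw [hcount_ne p.1 hpc]
        exact hcnt
    · intro x hx
      rcases (hmem_iff x).mp hx with h | h
      · subst h
        exact ⟨_, by rw [hstep]; exact List.mem_cons.mpr (Or.inl rfl)⟩
      · obtain ⟨n, hn⟩ := ih2 x h
        exact ⟨n, by rw [hstep]; exact List.mem_cons_of_mem _ hn⟩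
    · rw [hstep]
      simp only [List.map_cons, List.nodup_cons]
      refine ⟨?_, ih3⟩
      intro hmem
      rcases List.mem_map.mp hmem with ⟨p, hp, hpc⟩
      have hmem1 := (ih1 p hp).1
      rw [hpc] at hmem1
      exact hcrem hmem1
    · intro j0
      rw [hstep, List.foldl_cons, ih4]
      by_cases hJrem : 'J' ∈ (c :: rest).dropWhile (fun x => x == c)
      · have hJc : 'J' ≠ c := fun he => hcrem (he ▸ hJrem)
        have hJs : 'J' ∈ c :: rest := (hmem_iff 'J').mpr (Or.inr hJrem)
        rw [if_pos hJrem, if_pos hJs, hcount_ne 'J' hJc]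
      · by_cases hcJ : c = 'J'
        · subst hcJ
          have hJs : 'J' ∈ 'J' :: rest := by simp
          rw [if_neg hJrem, if_pos hJs]
          simp only [beq_self_eq_true]
          rw [if_pos trivial]
          exact hcount_c.symm
        · have hJs : 'J' ∉ c :: rest := fun h => by
            rcases (hmem_iff 'J').mp h with h' | h'
            · exact hcJ h'.symm
            · exact hJrem h'
          rw [if_neg hJrem, if_neg hJs]
          have hcf : (c == 'J') = false := beq_eq_false_iff_ne.mpr hcJ
          rw [hcf]
          rfl

theorem isFourOfKind_spec : Claim_equal_isFourOfKind := by
  intro hand _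
  unfold Spec_isFourOfKind isFourOfKind isFourOfKind_alt
  set l := hand.toList with hl
  set s := PySem.List.sorted l (fun x => x) false with hsdef
  have hperm : s.Perm l := PySem.List.sorted_perm l (fun x => x) false
  have hs : s.Pairwise (· ≤ ·) := by
    have := PySem.List.sorted_pairwise l (fun x => x)
    simpa using this
  obtain ⟨h1, h2, h3, h4⟩ := pv_altRuns_spec s hs
  have hJchar : ("J".toList) = ['J'] := by decide
  have hIsIn : PySem.Str.isIn "J" hand = decide ('J' ∈ l) := by
    have hiff : PySem.Str.isIn "J" hand = true ↔ 'J' ∈ l := by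
      rw [PySem.Str.isIn_iff_infix, hJchar]
      exact List.singleton_infix_iff 'J' hand.toList
    by_cases hJ : 'J' ∈ l
    · calc PySem.Str.isIn "J" hand = true := hiff.mpr hJ
        _ = decide ('J' ∈ l) := (decide_eq_true hJ).symm
    · rw [decide_eq_false hJ, Bool.eq_false_iff]
      exact fun hc => hJ (hiff.mp hc)
  have hcounts : l.foldl (fun d card => d.insert card (d.getD card 0 + 1)) PySem.Dict.empty
      = PySem.Dict.counter l := PySem.Dict.foldl_insert_getD_add_one_eq_counter l
  have hval : ∀ m : Int, (m ∈ (PySem.Dict.counter l).values ↔ ∃ c ∈ l, (l.count c : Int) = m) := by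
    intro m
    show m ∈ (PySem.Dict.counter l).items.map Prod.snd ↔ _
    rw [PySem.Dict.items_counter, List.map_map, List.mem_map]
    constructor
    · rintro ⟨c, hc, hcm⟩
      exact ⟨c, (PySem.Set.mem_ofList l c).mp hc, hcm⟩
    · rintro ⟨c, hc, hcm⟩
      exact ⟨c, (PySem.Set.mem_ofList l c).mpr hc, hcm⟩
  have hval4 : ((4:Int) ∈ (PySem.Dict.counter l).values) ↔ (∃ c ∈ l, l.count c = 4) := by
    rw [hval 4]
    constructor
    · rintro ⟨c, hc, hcm⟩; exact ⟨c, hc, by exact_mod_cast hcm⟩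
    · rintro ⟨c, hc, hcm⟩; exact ⟨c, hc, by exact_mod_cast hcm⟩
  have hval3 : ((3:Int) ∈ (PySem.Dict.counter l).values) ↔ (∃ c ∈ l, l.count c = 3) := by
    rw [hval 3]
    constructor
    · rintro ⟨c, hc, hcm⟩; exact ⟨c, hc, by exact_mod_cast hcm⟩
    · rintro ⟨c, hc, hcm⟩; exact ⟨c, hc, by exact_mod_cast hcm⟩
  have hgetD : (PySem.Dict.counter l).getD 'J' 0 = (l.count 'J' : Int) :=
    PySem.Dict.getD_counter l 'J'
  have hsize : (PySem.Dict.counter l).size = (PySem.Set.ofList l).length := by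
    show (PySem.Dict.counter l).items.length = _
    rw [PySem.Dict.items_counter, List.length_map]
  have hany : ∀ m : Nat, ((altRuns s).any (fun p => p.2 == m) = true ↔ ∃ c ∈ l, l.count c = m) := by
    intro m
    rw [List.any_eq_true]
    constructor
    · rintro ⟨p, hp, hpm⟩
      obtain ⟨hmem, hcnt⟩ := h1 p hp
      exact ⟨p.1, hperm.mem_iff.mp hmem, by rw [← hperm.count_eq, ← hcnt]; exact beq_iff_eq.mp hpm⟩
    · rintro ⟨c, hc, hcm⟩
      obtain ⟨n, hn⟩ := h2 c (hperm.mem_iff.mpr hc)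
      refine ⟨(c, n), hn, ?_⟩
      have hcn := (h1 (c, n) hn).2
      simp only at hcn
      rw [beq_iff_eq, hcn, hperm.count_eq]
      exact hcm
  have hb4 : (altRuns s).any (fun p => p.2 == 4) = decide (∃ c ∈ l, l.count c = 4) := by
    by_cases h : ∃ c ∈ l, l.count c = 4
    · rw [(hany 4).mpr h, decide_eq_true h]
    · rw [decide_eq_false h, Bool.eq_false_iff]
      exact fun hc => h ((hany 4).mp hc)
  have hb3 : (altRuns s).any (fun p => p.2 == 3) = decide (∃ c ∈ l, l.count c = 3) := by
    by_cases h : ∃ c ∈ l, l.count c = 3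
    · rw [(hany 3).mpr h, decide_eq_true h]
    · rw [decide_eq_false h, Bool.eq_false_iff]
      exact fun hc => h ((hany 3).mp hc)
  have hjok : (altRuns s).foldl (fun j p => if p.1 == 'J' then p.2 else j) 0 = l.count 'J' := by
    rw [h4 0]
    by_cases hJ : 'J' ∈ s
    · rw [if_pos hJ, hperm.count_eq]
    · rw [if_neg hJ]
      have hnl : 'J' ∉ l := fun h => hJ (hperm.mem_iff.mpr h)
      exact (List.count_eq_zero.mpr hnl).symm
  have hlen : (altRuns s).length = (PySem.Set.ofList l).length := by
    have hperm2 : ((altRuns s).map Prod.fst).Perm (PySem.Set.ofList l) := by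
      rw [List.perm_ext_iff_of_nodup h3 (PySem.Set.nodup_ofList l)]
      intro a
      rw [PySem.Set.mem_ofList, List.mem_map]
      constructor
      · rintro ⟨p, hp, hpa⟩
        exact hperm.mem_iff.mp (hpa ▸ (h1 p hp).1)
      · intro ha
        obtain ⟨n, hn⟩ := h2 a (hperm.mem_iff.mpr ha)
        exact ⟨(a, n), hn, rfl⟩
    have := hperm2.length_eq
    rw [List.length_map] at this
    exact this
  have hc1 : ((l.count 'J' : Int) = 1) ↔ l.count 'J' = 1 := by exact_mod_cast Iff.rfl
  have hc2 : ((l.count 'J' : Int) = 2) ↔ l.count 'J' = 2 := by exact_mod_cast Iff.rfl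
  have hc3 : ((l.count 'J' : Int) = 3) ↔ l.count 'J' = 3 := by exact_mod_cast Iff.rfl
  have hmemj : ('J' ∈ l) ↔ l.count 'J' ≠ 0 :=
    ⟨fun h hz => (List.count_eq_zero.mp hz) h,
     fun h => by by_contra hn; exact h (List.count_eq_zero.mpr hn)⟩
  simp only [hIsIn, hcounts, hgetD, hsize, hjok, hlen, hb4, hb3, hval4, hval3, hc1, hc2, hc3,
    beq_iff_eq]
  by_cases hJ : 'J' ∈ l
  · have hj : l.count 'J' ≠ 0 := hmemj.mp hJ
    by_cases hP4 : ∃ c ∈ l, l.count c = 4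
    · simp [hJ, hj, hP4]
    · have hj4 : l.count 'J' ≠ 4 := fun h => hP4 ⟨'J', hJ, h⟩
      by_cases hP3 : ∃ c ∈ l, l.count c = 3
      · simp [hJ, hj, hP4, hP3] <;>
          by_cases e1 : List.count 'J' l = 1 <;> by_cases e2 : List.count 'J' l = 2 <;>
          by_cases e3 : List.count 'J' l = 3 <;> by_cases ek : (PySem.Set.ofList l).length = 3 <;>
          (try simp_all) <;> (try omega)
      · have hj3 : l.count 'J' ≠ 3 := fun h => hP3 ⟨'J', hJ, h⟩
        simp [hJ, hj, hP4, hP3, hj3, hj4] <;>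
          by_cases e1 : List.count 'J' l = 1 <;> by_cases e2 : List.count 'J' l = 2 <;>
          by_cases ek : (PySem.Set.ofList l).length = 3 <;>
          (try simp_all) <;> (try omega)
  · have hj : l.count 'J' = 0 := by
      by_contra h
      exact hJ (hmemj.mpr h)
    by_cases hP4 : ∃ c ∈ l, l.count c = 4 <;>
      simp [hJ, hj, hP4] <;> (try split_ifs) <;> (try simp_all) <;> (try omega)
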